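-- pv_equiv track=rewrite | github.com/PMKielstra/UnperturbedCPMatching | cpmatching/_utils/positions.py | get_original_position
-- ===== SOURCE A (Python) =====
-- def get_original_position(removed_constraints, new_constraint):
--     """Given a list of indices that have already been removed from a list, and the index of an element in the pruned list, find the index of the element in the original list."""
--     working = 0
--     pointer = 0
--     while working <= new_constraint:
--         if pointer not in removed_constraints:
--             working += 1
--         pointer += 1
--     return pointer - 1
-- ===== SOURCE B (Python) =====
-- def get_original_position(removed_constraints, new_constraint):
--     """Given a list of indices that have already been removed from a list, and the index of an element in the pruned list, find the index of the element in the original list."""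
--     pos = new_constraint
--     for r in sorted({r for r in removed_constraints if r >= 0}):
--         if r <= pos:
--             pos += 1
--     return pos
-- ===== Notes on version B (the rewrite author's own statement) =====
-- stated objective: faster
-- what changed: B replaces A's step-by-step counter walk with an inner membership scan per step by one sort of the distinct non-negative removed indices followed by a single adjusting pass over them.
-- outside the precondition, e.g. on get_original_position([], -2): A returns -1, B returns -2
import Mathlib
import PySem

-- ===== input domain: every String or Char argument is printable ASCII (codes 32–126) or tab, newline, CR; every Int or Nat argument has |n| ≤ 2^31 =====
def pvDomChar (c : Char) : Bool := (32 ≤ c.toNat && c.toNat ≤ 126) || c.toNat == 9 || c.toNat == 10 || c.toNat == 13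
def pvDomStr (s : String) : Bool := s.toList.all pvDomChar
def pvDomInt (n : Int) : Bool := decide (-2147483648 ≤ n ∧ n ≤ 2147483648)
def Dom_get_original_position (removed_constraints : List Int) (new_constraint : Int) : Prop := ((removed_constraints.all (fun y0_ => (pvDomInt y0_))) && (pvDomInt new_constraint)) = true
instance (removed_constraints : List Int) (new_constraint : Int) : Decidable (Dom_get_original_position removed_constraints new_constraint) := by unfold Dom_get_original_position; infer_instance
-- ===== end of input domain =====

-- B replaces A's step-by-step counter walk (with a membership scan per step) by one sort of the
-- distinct non-negative removed indices followed by a single adjusting pass over them.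

-- ===== PORT A =====
-- termination helpers for A's while-loop
theorem pvCount_mono (l : List Int) (p : Int) :
    l.countP (fun r => decide (p + 1 ≤ r)) ≤ l.countP (fun r => decide (p ≤ r)) := by
  apply List.countP_mono_left
  intro a _ h
  simp only [decide_eq_true_eq] at *
  omega

theorem pvCount_strict (l : List Int) (p : Int) (h : p ∈ l) :
    l.countP (fun r => decide (p + 1 ≤ r)) < l.countP (fun r => decide (p ≤ r)) := by
  induction l with
  | nil => simp at h
  | cons a t ih =>
    rw [List.mem_cons] at h
    simp only [List.countP_cons]
    have hm := pvCount_mono t p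
    have hde : (if decide (p + 1 ≤ a) = true then 1 else 0)
        ≤ (if decide (p ≤ a) = true then 1 else 0) := by
      split_ifs with h1 h2 <;> simp_all <;> omega
    rcases h with rfl | h
    · have h1 : (decide (p + 1 ≤ p)) = false := decide_eq_false (by omega)
      have h2 : (decide (p ≤ p)) = true := decide_eq_true (le_refl p)
      simp only [h1, h2] at *
      simp at *
      omega
    · have := ih h
      omega

-- A's while-loop, step for step: working/pointer counters, membership test each step
def goA (removed_constraints : List Int) (new_constraint : Int) (working pointer : Int) : Int :=
  if working ≤ new_constraint then
    if pointer ∉ removed_constraints then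
      goA removed_constraints new_constraint (working + 1) (pointer + 1)
    else
      goA removed_constraints new_constraint working (pointer + 1)
  else pointer - 1
termination_by (new_constraint + 1 - working).toNat + removed_constraints.countP (fun r => decide (pointer ≤ r))
decreasing_by
  · have := pvCount_mono removed_constraints pointer
    omega
  · have hm : pointer ∈ removed_constraints := by
      by_contra hc; exact absurd hc (by assumption)
    have := pvCount_strict removed_constraints pointer hm
    omega

def get_original_position (removed_constraints : List Int) (new_constraint : Int) : Int :=
  goA removed_constraints new_constraint 0 0

-- ===== PORT B =====
def get_original_position_alt (removed_constraints : List Int) (new_constraint : Int) : Int :=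
  (PySem.List.sorted
      (PySem.Set.ofList (removed_constraints.filter (fun r => decide (0 ≤ r))))
      (fun x => x) false).foldl
    (fun pos r => if r ≤ pos then pos + 1 else pos) new_constraint

-- ===== PRECONDITION & SPEC =====
-- Pre_ excludes negative new_constraint: not an index into the pruned list, an unspecified corner
-- on which A's constant -1 and B's identity answer are equally accidental choices.
def Pre_get_original_position (removed_constraints : List Int) (new_constraint : Int) : Prop :=
  0 ≤ new_constraint
instance (removed_constraints : List Int) (new_constraint : Int) : Decidable (Pre_get_original_position removed_constraints new_constraint) := by unfold Pre_get_original_position; infer_instance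

def pvWitness_get_original_position : List Int × Int := ([1, 3], 2)

def Spec_get_original_position (removed_constraints : List Int) (new_constraint : Int) (out : Int) : Prop := out = get_original_position_alt removed_constraints new_constraint
instance (removed_constraints : List Int) (new_constraint : Int) (out : Int) : Decidable (Spec_get_original_position removed_constraints new_constraint out) := by unfold Spec_get_original_position; infer_instance

-- ===== CLAIM (what is proved, stated in full; the proofs are below) =====
def Claim_equal_get_original_position : Prop := ∀ (removed_constraints : List Int) (new_constraint : Int), Dom_get_original_position removed_constraints new_constraint → Pre_get_original_position removed_constraints new_constraint → Spec_get_original_position removed_constraints new_constraint (get_original_position removed_constraints new_constraint)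

-- ===== LEMMAS AND PROOFS =====

-- the distinct non-negative removed indices (the set both programs effectively consult)
def pvRd (removed_constraints : List Int) : List Int :=
  PySem.Set.ofList (removed_constraints.filter (fun r => decide (0 ≤ r)))

-- both results are characterised by the same property: p is not removed and exactly
-- new_constraint indices below it survive
def Good (Rd : List Int) (n p : Int) : Prop :=
  0 ≤ p ∧ p ∉ Rd ∧ p - (Rd.countP (fun r => decide (r ≤ p)) : Int) = n

theorem pv_mem_Rd (removed_constraints : List Int) (p : Int) :
    p ∈ pvRd removed_constraints ↔ p ∈ removed_constraints ∧ 0 ≤ p := by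
  unfold pvRd
  rw [PySem.Set.mem_ofList]
  simp [List.mem_filter]
  -- (and_comm aligns the two conjunction orders)

theorem pv_nodup_Rd (removed_constraints : List Int) : (pvRd removed_constraints).Nodup :=
  PySem.Set.nodup_ofList _

theorem countP_split (l : List Int) (p q : Int) (h : p ≤ q) :
    l.countP (fun r => decide (r ≤ q))
      = l.countP (fun r => decide (r ≤ p)) + l.countP (fun r => decide (p < r ∧ r ≤ q)) := by
  induction l with
  | nil => simp
  | cons a t ih =>
    simp only [List.countP_cons]
    by_cases h1 : a ≤ p
    · have d1 : decide (a ≤ p) = true := decide_eq_true h1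
      have d2 : decide (a ≤ q) = true := decide_eq_true (le_trans h1 h)
      have d3 : decide (p < a ∧ a ≤ q) = false := decide_eq_false (by omega)
      simp only [d1, d2, d3] at *; simp at *; omega
    · by_cases h2 : a ≤ q
      · have d1 : decide (a ≤ p) = false := decide_eq_false (by omega)
        have d2 : decide (a ≤ q) = true := decide_eq_true h2
        have d3 : decide (p < a ∧ a ≤ q) = true := decide_eq_true ⟨by omega, h2⟩
        simp only [d1, d2, d3] at *; simp at *; omega
      · have d1 : decide (a ≤ p) = false := decide_eq_false (by omega)
        have d2 : decide (a ≤ q) = false := decide_eq_false (by omega)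
        have d3 : decide (p < a ∧ a ≤ q) = false := decide_eq_false (by omega)
        simp only [d1, d2, d3] at *; simp at *; omega

theorem countP_le_card (l : List Int) (hn : l.Nodup) (a b : Int) (hab : a ≤ b) :
    (l.countP (fun r => decide (a < r ∧ r ≤ b)) : Int) ≤ b - a := by
  rw [List.countP_eq_length_filter]
  have hf : (l.filter (fun r => decide (a < r ∧ r ≤ b))).Nodup := List.Nodup.filter _ hn
  have hsub : (l.filter (fun r => decide (a < r ∧ r ≤ b))).toFinset ⊆ Finset.Ioc a b := by
    intro x hx
    rw [List.mem_toFinset] at hx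
    have hp := List.of_mem_filter hx
    simp only [decide_eq_true_eq] at hp
    exact Finset.mem_Ioc.mpr hp
  have hcard := Finset.card_le_card hsub
  rw [List.toFinset_card_of_nodup hf, Int.card_Ioc] at hcard
  omega

-- splitting a ≤-count / a <-count at a single point
theorem countP_le_eq (l : List Int) (p : Int) :
    l.countP (fun r => decide (r ≤ p))
      = l.countP (fun r => decide (r < p)) + l.countP (fun r => decide (r = p)) := by
  induction l with
  | nil => simp
  | cons a t ih =>
    simp only [List.countP_cons]
    by_cases h1 : a < p
    · have d1 : decide (a ≤ p) = true := decide_eq_true (by omega)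
      have d2 : decide (a < p) = true := decide_eq_true h1
      have d3 : decide (a = p) = false := decide_eq_false (by omega)
      simp only [d1, d2, d3] at *; simp at *; omega
    · by_cases h2 : a = p
      · have d1 : decide (a ≤ p) = true := decide_eq_true (by omega)
        have d2 : decide (a < p) = false := decide_eq_false h1
        have d3 : decide (a = p) = true := decide_eq_true h2
        simp only [d1, d2, d3] at *; simp at *; omega
      · have d1 : decide (a ≤ p) = false := decide_eq_false (by omega)
        have d2 : decide (a < p) = false := decide_eq_false h1
        have d3 : decide (a = p) = false := decide_eq_false h2
        simp only [d1, d2, d3] at *; simp at *; omega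

theorem countP_lt_succ (l : List Int) (p : Int) :
    l.countP (fun r => decide (r < p + 1))
      = l.countP (fun r => decide (r < p)) + l.countP (fun r => decide (r = p)) := by
  rw [← countP_le_eq]
  apply List.countP_congr
  intro x _
  simp only [decide_eq_true_eq]
  omega

theorem countP_eq_zero_of_not_mem (l : List Int) (p : Int) (h : p ∉ l) :
    l.countP (fun r => decide (r = p)) = 0 :=
  List.countP_eq_zero.mpr (by intro x hx; simp only [decide_eq_true_eq]
                              rintro rfl; exact h hx)

theorem countP_eq_one_of_nodup_mem (l : List Int) (p : Int) :
    l.Nodup → p ∈ l → l.countP (fun r => decide (r = p)) = 1 := by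
  induction l with
  | nil => intro _ h; simp at h
  | cons a t ih =>
    intro hn h
    rw [List.mem_cons] at h
    rw [List.nodup_cons] at hn
    simp only [List.countP_cons]
    rcases h with rfl | h
    · have d : decide (p = p) = true := decide_eq_true rfl
      have hz : t.countP (fun r => decide (r = p)) = 0 :=
        countP_eq_zero_of_not_mem t p hn.1
      simp [hz]
    · have d : decide (a = p) = false := decide_eq_false (by rintro rfl; exact hn.1 h)
      simp [d, ih hn.2 h]

theorem Good_not_lt (Rd : List Int) (hn : Rd.Nodup) (n p q : Int)
    (hp : Good Rd n p) (hq : Good Rd n q) (hpq : p < q) : False := by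
  obtain ⟨hp0, hpm, hpe⟩ := hp
  obtain ⟨hq0, hqm, hqe⟩ := hq
  have hs := countP_split Rd p q (le_of_lt hpq)
  have hcongr : Rd.countP (fun r => decide (p < r ∧ r ≤ q))
      = Rd.countP (fun r => decide (p < r ∧ r ≤ q - 1)) := by
    apply List.countP_congr
    intro x hx
    have hxq : x ≠ q := by rintro rfl; exact hqm hx
    simp only [decide_eq_true_eq]
    omega
  have hb := countP_le_card Rd hn p (q - 1) (by omega)
  omega

theorem Good_unique (Rd : List Int) (hn : Rd.Nodup) (n p q : Int)
    (hp : Good Rd n p) (hq : Good Rd n q) : p = q := by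
  rcases lt_trichotomy p q with h | h | h
  · exact absurd (Good_not_lt Rd hn n p q hp hq h) id
  · exact h
  · exact absurd (Good_not_lt Rd hn n q p hq hp h) id

theorem goA_good (removed_constraints : List Int) (n : Int) :
    ∀ working pointer : Int, 0 ≤ pointer →
      working = pointer - ((pvRd removed_constraints).countP (fun r => decide (r < pointer)) : Int) →
      working ≤ n →
      Good (pvRd removed_constraints) n (goA removed_constraints n working pointer) := by
  intro working pointer
  fun_induction goA removed_constraints n working pointer with
  | case1 working pointer h1 h2 ih =>
    -- pointer not removed: working increments
    intro h0 hinv hle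
    have hnotin : pointer ∉ pvRd removed_constraints := by
      rw [pv_mem_Rd]; intro hc; exact h2 hc.1
    have hz := countP_eq_zero_of_not_mem (pvRd removed_constraints) pointer hnotin
    have hsucc := countP_lt_succ (pvRd removed_constraints) pointer
    by_cases hle2 : working + 1 ≤ n
    · exact ih (by omega) (by omega) hle2
    · have hstop : goA removed_constraints n (working + 1) (pointer + 1) = (pointer + 1) - 1 := by
        rw [goA]; rw [if_neg hle2]
      rw [hstop]
      have hle' := countP_le_eq (pvRd removed_constraints) pointer
      refine ⟨by omega, ?_, ?_⟩
      · have e : pointer + 1 - 1 = pointer := by ring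
        rw [e]; exact hnotin
      · have e : pointer + 1 - 1 = pointer := by ring
        rw [e]; omega
  | case2 working pointer h1 h2 ih =>
    -- pointer removed: only the pointer advances
    intro h0 hinv hle
    have hin : pointer ∈ pvRd removed_constraints := by
      rw [pv_mem_Rd]; exact ⟨by by_contra hc; exact h2 hc, h0⟩
    have hone := countP_eq_one_of_nodup_mem (pvRd removed_constraints) pointer
      (pv_nodup_Rd removed_constraints) hin
    have hsucc := countP_lt_succ (pvRd removed_constraints) pointer
    exact ih (by omega) (by omega) hle
  | case3 working pointer h1 =>
    intro _ _ hle
    exact absurd hle h1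

theorem foldB_const (s : List Int) : ∀ pos : Int, (∀ x ∈ s, pos < x) →
    s.foldl (fun pos r => if r ≤ pos then pos + 1 else pos) pos = pos := by
  intro pos h
  induction s with
  | nil => rfl
  | cons a t ih =>
    have ha : ¬ a ≤ pos := by have := h a (by simp); omega
    simp only [List.foldl_cons, if_neg ha]
    exact ih (fun x hx => h x (by simp [hx]))

theorem foldB_good (s : List Int) (hs : s.Pairwise (· < ·)) :
    ∀ pos : Int,
      pos ≤ s.foldl (fun pos r => if r ≤ pos then pos + 1 else pos) pos ∧
      s.foldl (fun pos r => if r ≤ pos then pos + 1 else pos) pos ∉ s ∧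
      s.foldl (fun pos r => if r ≤ pos then pos + 1 else pos) pos
        - (s.countP (fun r => decide (r ≤ s.foldl (fun pos r => if r ≤ pos then pos + 1 else pos) pos)) : Int) = pos := by
  induction s with
  | nil => intro pos; simp
  | cons a t ih =>
    rw [List.pairwise_cons] at hs
    intro pos
    by_cases hca : a ≤ pos
    · simp only [List.foldl_cons, if_pos hca]
      obtain ⟨ih1, ih2, ih3⟩ := ih hs.2 (pos + 1)
      refine ⟨by omega, ?_, ?_⟩
      · rw [List.mem_cons]
        rintro (rfl | hmem)
        · omega
        · exact ih2 hmem
      · rw [List.countP_cons]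
        have d : decide (a ≤ t.foldl (fun pos r => if r ≤ pos then pos + 1 else pos) (pos + 1)) = true :=
          decide_eq_true (by omega)
        rw [d]
        simp only [if_pos]
        push_cast
        omega
    · have hgt : ∀ x ∈ t, pos < x := fun x hx => lt_trans (by omega) (hs.1 x hx)
      have e : (a :: t).foldl (fun pos r => if r ≤ pos then pos + 1 else pos) pos = pos := by
        simp only [List.foldl_cons, if_neg hca]
        exact foldB_const t pos hgt
      rw [e]
      refine ⟨le_refl pos, ?_, ?_⟩
      · rw [List.mem_cons]
        rintro (rfl | hmem)
        · omega
        · exact absurd (hgt _ hmem) (by omega)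
      · have hz : (a :: t).countP (fun r => decide (r ≤ pos)) = 0 := by
          apply List.countP_eq_zero.mpr
          intro x hx
          simp only [decide_eq_true_eq]
          rw [List.mem_cons] at hx
          rcases hx with rfl | hx
          · omega
          · have := hgt x hx; omega
        rw [hz]
        simp

-- ===== VERDICT (by name: the statement is the Claim_ definition above) =====
theorem get_original_position_spec : Claim_equal_get_original_position := by
  intro removed_constraints new_constraint _ hpre
  have hp : (0 : Int) ≤ new_constraint := hpre
  unfold Spec_get_original_position
  have hA : Good (pvRd removed_constraints) new_constraint
      (get_original_position removed_constraints new_constraint) := by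
    unfold get_original_position
    have hz : (pvRd removed_constraints).countP (fun r => decide (r < 0)) = 0 := by
      apply List.countP_eq_zero.mpr
      intro x hx
      have := (pv_mem_Rd removed_constraints x).mp hx
      simp only [decide_eq_true_eq]
      omega
    exact goA_good removed_constraints new_constraint 0 0 (le_refl 0) (by omega) hp
  have hB : Good (pvRd removed_constraints) new_constraint
      (get_original_position_alt removed_constraints new_constraint) := by
    unfold get_original_position_alt pvRd
    have hs := PySem.List.sorted_ofList_pairwise_lt
      (removed_constraints.filter (fun r => decide (0 ≤ r)))
    obtain ⟨h1, h2, h3⟩ := foldB_good _ hs new_constraint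
    have hperm := PySem.List.sorted_perm
      (PySem.Set.ofList (removed_constraints.filter (fun r => decide (0 ≤ r)))) (fun x => x) false
    refine ⟨by omega, ?_, ?_⟩
    · intro hmem
      exact h2 ((PySem.List.mem_sorted _ _ _ _).mpr hmem)
    · rw [← List.Perm.countP_eq _ hperm]
      exact h3
  exact Good_unique (pvRd removed_constraints) (pv_nodup_Rd removed_constraints)
    new_constraint _ _ hA hB
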